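-- pv_equiv track=rewrite | github.com/InfiniteLoop360/GFG_POTD | Maximum Non-Overlapping Odd Palindrome Sum.py | compute_endLen
-- ===== SOURCE A (Python) =====
-- from collections import deque
--
-- def compute_endLen(s, d1):
--     """Computes the length of the longest odd palindrome ending at each position."""
--     n = len(s)
--     endLen = [0] * n
--     R = [i + d1[i] - 1 for i in range(n)]
--     q = deque()
--
--     for p in range(n):
--         q.append(p)
--         while q and R[q[0]] < p:
--             q.popleft()
--         if q:
--             endLen[p] = 2 * (p - q[0]) + 1
--         else:
--             endLen[p] = 0
--     return endLen
-- ===== SOURCE B (Python) =====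
-- def compute_endLen(s, d1):
--     """Computes the length of the longest odd palindrome ending at each position."""
--     n = len(s)
--     res = []
--     for p in range(n):
--         c = next((j for j in range(p + 1) if j + d1[j] - 1 >= p), None)
--         res.append(0 if c is None else 2 * (p - c) + 1)
--     return res
-- ===== Notes on version B (the rewrite author's own statement) =====
-- stated objective: simpler
-- what changed: Drops A's deque sweep and precomputed R array entirely: for each position p it directly searches for the first center j in range(p+1) whose palindrome reaches p (j + d1[j] - 1 >= p), turning the amortized stateful sweep into a stateless per-position definition-as-code search.
import Mathlib
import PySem

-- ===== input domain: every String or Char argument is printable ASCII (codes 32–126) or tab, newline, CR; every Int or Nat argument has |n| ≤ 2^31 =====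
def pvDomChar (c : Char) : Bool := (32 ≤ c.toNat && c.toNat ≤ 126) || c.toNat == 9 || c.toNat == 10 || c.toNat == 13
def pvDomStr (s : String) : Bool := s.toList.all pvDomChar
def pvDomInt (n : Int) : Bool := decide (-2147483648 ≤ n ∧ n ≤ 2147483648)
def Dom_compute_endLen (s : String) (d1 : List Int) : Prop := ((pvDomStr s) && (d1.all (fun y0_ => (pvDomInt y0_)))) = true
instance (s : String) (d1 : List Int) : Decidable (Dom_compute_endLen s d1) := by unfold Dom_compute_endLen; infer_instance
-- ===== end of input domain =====

-- B replaces A's deque sweep (and precomputed R array) by a stateless per-position search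
-- for the first center whose palindrome reaches p; objective: simpler (not faster).


-- ===== PORT A =====
-- A's while loop popping the deque's front while R[q[0]] < p.
-- (R.getD c 0 is exact here: every queued index c is < n = R.length; d1[i] is ported
-- as d1.getD i 0 with Pre_ excluding the out-of-range IndexError.)
def popFront (R : List Int) (p : Int) : List Nat → List Nat
  | [] => []
  | c :: rest => if R.getD c 0 < p then popFront R p rest else c :: rest

-- one iteration of A's for-loop
def stepA (R : List Int) (st : List Int × List Nat) (p : Nat) : List Int × List Nat :=
  let q := popFront R (p : Int) (st.2 ++ [p])
  match q with
  | [] => (st.1.set p 0, q)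
  | c :: _ => (st.1.set p (2 * ((p : Int) - (c : Int)) + 1), q)

def compute_endLen (s : String) (d1 : List Int) : List Int :=
  let n := s.toList.length
  let R : List Int := (List.range n).map (fun (i : Nat) => (i : Int) + d1.getD i 0 - 1)
  ((List.range n).foldl (stepA R) (List.replicate n 0, [])).1

-- ===== PORT B =====
-- B: for each p, the first center j in range(p+1) with j + d1[j] - 1 >= p (next(...) over a
-- generator ported as List.find?), then 0 or 2*(p-j)+1.
def compute_endLen_alt (s : String) (d1 : List Int) : List Int :=
  let n := s.toList.length
  (List.range n).map (fun p =>
    match (List.range (p + 1)).find? (fun (j : Nat) => decide ((j : Int) + d1.getD j 0 - 1 ≥ (p : Int))) with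
    | none => 0
    | some c => 2 * ((p : Int) - (c : Int)) + 1)

-- ===== PRECONDITION & SPEC =====
-- Pre_ excludes exactly the inputs on which Python A raises IndexError (d1[i] with
-- i < len(s) but i >= len(d1)); it admits every input A returns on.
def Pre_compute_endLen (s : String) (d1 : List Int) : Prop := s.toList.length ≤ d1.length
instance (s : String) (d1 : List Int) : Decidable (Pre_compute_endLen s d1) := by unfold Pre_compute_endLen; infer_instance
def pvWitness_compute_endLen : String × List Int := ("aba", [1, 2, 1])

def Spec_compute_endLen (s : String) (d1 : List Int) (out : List Int) : Prop := out = compute_endLen_alt s d1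
instance (s : String) (d1 : List Int) (out : List Int) : Decidable (Spec_compute_endLen s d1 out) := by unfold Spec_compute_endLen; infer_instance

-- ===== CLAIM (what is proved, stated in full; the proofs are below) =====
def Claim_equal_compute_endLen : Prop := ∀ (s : String) (d1 : List Int), Dom_compute_endLen s d1 → Pre_compute_endLen s d1 → Spec_compute_endLen s d1 (compute_endLen s d1)

-- ===== LEMMAS AND PROOFS =====

-- B's per-position value, as a named helper for the proofs
def bval (d1 : List Int) (p : Nat) : Int :=
  match (List.range (p + 1)).find? (fun (j : Nat) => decide ((j : Int) + d1.getD j 0 - 1 ≥ (p : Int))) with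
  | none => 0
  | some c => 2 * ((p : Int) - (c : Int)) + 1

-- the smallest center ≥ l that is still valid at position p (A's deque front after popping)
def advance (d1 : List Int) (p : Nat) (left : Nat) : Nat :=
  if _h : left ≤ p then
    if (left : Int) + d1.getD left 0 - 1 < (p : Int) then advance d1 p (left + 1) else left
  else left
termination_by p + 1 - left

lemma range'_snoc (l m : Nat) : List.range' l m ++ [l + m] = List.range' l (m + 1) := by
  induction m generalizing l with
  | zero => simp [List.range']
  | succ m ih =>
    rw [List.range'_succ, List.cons_append, show l + (m + 1) = (l + 1) + m from by omega,
      ih (l + 1), ← List.range'_succ]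

lemma set_at_len {α : Type} : ∀ (acc : List α) (x : α) (r : List α) (v : α),
    (acc ++ x :: r).set acc.length v = acc ++ v :: r := by
  intro acc
  induction acc with
  | nil => intro x r v; rfl
  | cons a t ih => intro x r v; simp [ih]

lemma advance_le (d1 : List Int) (p : Nat) :
    ∀ k l, p + 1 - l ≤ k → l ≤ p + 1 → advance d1 p l ≤ p + 1 := by
  intro k
  induction k with
  | zero =>
    intro l hk hl
    rw [advance, dif_neg (by omega : ¬ l ≤ p)]
    exact hl
  | succ k ih =>
    intro l hk hl
    rw [advance]
    split_ifs with h1 h2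
    · exact ih (l + 1) (by omega) (by omega)
    · omega
    · omega

lemma advance_ge (d1 : List Int) (p : Nat) :
    ∀ k l, p + 1 - l ≤ k → l ≤ advance d1 p l := by
  intro k
  induction k with
  | zero =>
    intro l hk
    rw [advance, dif_neg (by omega : ¬ l ≤ p)]
  | succ k ih =>
    intro l hk
    rw [advance]
    split_ifs with h1 h2
    · exact le_trans (by omega) (ih (l + 1) (by omega))
    · exact le_refl l
    · exact le_refl l

lemma advance_invalid (d1 : List Int) (p : Nat) :
    ∀ k l, p + 1 - l ≤ k → ∀ c, l ≤ c → c < advance d1 p l →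
      (c : Int) + d1.getD c 0 - 1 < (p : Int) := by
  intro k
  induction k with
  | zero =>
    intro l hk c hc1 hc2
    rw [advance, dif_neg (by omega : ¬ l ≤ p)] at hc2
    omega
  | succ k ih =>
    intro l hk c hc1 hc2
    rw [advance] at hc2
    split_ifs at hc2 with h1 h2
    · rcases Nat.eq_or_lt_of_le hc1 with rfl | hlt
      · exact h2
      · exact ih (l + 1) (by omega) c (by omega) hc2
    · omega
    · omega

lemma popFront_range' (d1 : List Int) (n p : Nat) (hp : p < n) :
    ∀ (m l : Nat), l + m = p + 1 →
      popFront ((List.range n).map (fun (i : Nat) => (i : Int) + d1.getD i 0 - 1)) (p : Int)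
          (List.range' l m)
        = List.range' (advance d1 p l) (p + 1 - advance d1 p l) := by
  intro m
  induction m with
  | zero =>
    intro l h
    rw [advance, dif_neg (by omega : ¬ l ≤ p)]
    simp [popFront, List.range', show p + 1 - l = 0 from by omega]
  | succ m ih =>
    intro l h
    have hlp : l ≤ p := by omega
    have hln : l < n := by omega
    have hRl : (((List.range n).map (fun (i : Nat) => (i : Int) + d1.getD i 0 - 1)).getD l 0)
        = (l : Int) + d1.getD l 0 - 1 := by
      simp [List.getD_eq_getElem?_getD, hln]
    rw [List.range'_succ]
    by_cases hcond : (l : Int) + d1.getD l 0 - 1 < (p : Int)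
    · simp only [popFront, hRl, if_pos hcond]
      rw [show advance d1 p l = advance d1 p (l + 1) from by
        rw [advance, dif_pos hlp, if_pos hcond]]
      exact ih (l + 1) (by omega)
    · simp only [popFront, hRl, if_neg hcond]
      rw [show advance d1 p l = l from by rw [advance, dif_pos hlp, if_neg hcond]]
      rw [show p + 1 - l = m + 1 from by omega, List.range'_succ]

-- find? over the suffix range' l m mirrors advance
lemma find?_range'_advance (d1 : List Int) (p : Nat) :
    ∀ (m l : Nat), l + m = p + 1 →
      (List.range' l m).find? (fun (j : Nat) => decide ((j : Int) + d1.getD j 0 - 1 ≥ (p : Int)))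
        = if advance d1 p l ≤ p then some (advance d1 p l) else none := by
  intro m
  induction m with
  | zero =>
    intro l h
    have hnl : ¬ l ≤ p := by omega
    rw [advance, dif_neg hnl, if_neg hnl]
    rfl
  | succ m ih =>
    intro l h
    have hlp : l ≤ p := by omega
    by_cases hcond : (l : Int) + d1.getD l 0 - 1 < (p : Int)
    · rw [List.range'_succ, List.find?_cons, decide_eq_false (not_le.mpr hcond),
        show advance d1 p l = advance d1 p (l + 1) from by
          rw [advance, dif_pos hlp, if_pos hcond]]
      exact ih (l + 1) (by omega)
    · rw [List.range'_succ, List.find?_cons, decide_eq_true (not_lt.mp hcond),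
        show advance d1 p l = l from by rw [advance, dif_pos hlp, if_neg hcond],
        if_pos hlp]

-- given that every center below l is invalid at p, B's search equals advance from l
lemma bval_eq_advance (d1 : List Int) (p l : Nat) (hl : l ≤ p + 1)
    (hinv : ∀ c, c < l → (c : Int) + d1.getD c 0 - 1 < (p : Int)) :
    bval d1 p = if advance d1 p l ≤ p
      then 2 * ((p : Int) - (advance d1 p l : Int)) + 1 else 0 := by
  have hsplit : List.range (p + 1) = List.range' 0 l ++ List.range' l (p + 1 - l) := by
    rw [List.range_eq_range', show p + 1 = l + (p + 1 - l) from by omega, ← List.range'_append]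
    simp
  have hnone : (List.range' 0 l).find?
      (fun (j : Nat) => decide ((j : Int) + d1.getD j 0 - 1 ≥ (p : Int))) = none := by
    rw [List.find?_eq_none]
    intro x hx
    simp only [List.mem_range'_1] at hx
    simpa using not_le.mpr (hinv x (by omega))
  unfold bval
  rw [hsplit, List.find?_append, hnone, Option.none_or,
    find?_range'_advance d1 p (p + 1 - l) l (by omega)]
  split_ifs <;> rfl

-- A's foldl produces exactly B's per-position values
lemma loop_eq (d1 : List Int) (n : Nat) :
    ∀ (m j : Nat) (acc : List Int) (l : Nat), j + m = n → l ≤ j → acc.length = j →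
      (∀ c, c < l → (c : Int) + d1.getD c 0 - 1 < (j : Int)) →
      ((List.range' j m).foldl
          (stepA ((List.range n).map (fun (i : Nat) => (i : Int) + d1.getD i 0 - 1)))
          (acc ++ List.replicate (n - j) 0, List.range' l (j - l))).1
      = acc ++ (List.range' j m).map (bval d1) := by
  intro m
  induction m with
  | zero =>
    intro j acc l hjm hlj hlen hinv
    simp [List.range', show n - j = 0 from by omega]
  | succ m ih =>
    intro j acc l hjm hlj hlen hinv
    have hjn : j < n := by omega
    rw [List.range'_succ, List.foldl_cons, List.map_cons]
    set l' := advance d1 j l with hl'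
    have hl'le : l' ≤ j + 1 := advance_le d1 j (j + 1 - l) l (le_refl _) (by omega)
    have hl'ge : l ≤ l' := advance_ge d1 j (j + 1 - l) l (le_refl _)
    have hpop : popFront ((List.range n).map (fun (i : Nat) => (i : Int) + d1.getD i 0 - 1))
        ((j : Nat) : Int) (List.range' l (j - l) ++ [j])
        = List.range' l' (j + 1 - l') := by
      have hsn := range'_snoc l (j - l)
      rw [show l + (j - l) = j from by omega] at hsn
      rw [hsn]
      exact popFront_range' d1 n j hjn (j - l + 1) l (by omega)
    have hrep : List.replicate (n - j) (0 : Int) = 0 :: List.replicate (n - (j + 1)) 0 := by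
      rw [show n - j = (n - (j + 1)) + 1 from by omega, List.replicate_succ]
    have hbv := bval_eq_advance d1 j l (by omega) hinv
    rw [← hl'] at hbv
    have hinv' : ∀ c, c < l' → (c : Int) + d1.getD c 0 - 1 < ((j + 1 : Nat) : Int) := by
      intro c hc
      by_cases hcl : c < l
      · have := hinv c hcl
        push_cast
        push_cast at this
        omega
      · have := advance_invalid d1 j (j + 1 - l) l (le_refl _) c (by omega) hc
        push_cast
        push_cast at this
        omega
    by_cases hc : l' ≤ j
    · have hrange : List.range' l' (j + 1 - l') = l' :: List.range' (l' + 1) (j - l') := by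
        rw [show j + 1 - l' = (j - l') + 1 from by omega, List.range'_succ]
      have hA : stepA ((List.range n).map (fun (i : Nat) => (i : Int) + d1.getD i 0 - 1))
          (acc ++ List.replicate (n - j) 0, List.range' l (j - l)) j
          = ((acc ++ [2 * ((j : Int) - (l' : Int)) + 1]) ++ List.replicate (n - (j + 1)) 0,
             List.range' l' ((j + 1) - l')) := by
        simp only [stepA, hpop, hrange]
        rw [hrep, ← hlen, set_at_len]
        simp
      rw [hA, hbv, if_pos hc]
      have := ih (j + 1) (acc ++ [2 * ((j : Int) - (l' : Int)) + 1]) l' (by omega) (by omega)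
        (by simp [hlen]) hinv'
      rw [show j + 1 - l' = (j + 1) - l' from rfl] at this
      rw [this]
      simp
    · have hempty : List.range' l' (j + 1 - l') = [] := by
        rw [show j + 1 - l' = 0 from by omega]
        rfl
      have hA : stepA ((List.range n).map (fun (i : Nat) => (i : Int) + d1.getD i 0 - 1))
          (acc ++ List.replicate (n - j) 0, List.range' l (j - l)) j
          = ((acc ++ [(0 : Int)]) ++ List.replicate (n - (j + 1)) 0,
             List.range' (j + 1) ((j + 1) - (j + 1))) := by
        simp only [stepA, hpop, hempty]
        rw [hrep, ← hlen, set_at_len]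
        simp
      rw [hA, hbv, if_neg hc]
      have hinv'' : ∀ c, c < j + 1 → (c : Int) + d1.getD c 0 - 1 < ((j + 1 : Nat) : Int) := by
        intro c hcj
        exact hinv' c (by omega)
      have := ih (j + 1) (acc ++ [(0 : Int)]) (j + 1) (by omega) (le_refl _)
        (by simp [hlen]) hinv''
      rw [this]
      simp

-- compute_endLen_alt written through the named helper (definitional)
lemma alt_eq_map_bval (s : String) (d1 : List Int) :
    compute_endLen_alt s d1 = (List.range s.toList.length).map (bval d1) := rfl

-- ===== VERDICT (by name: the statement is the Claim_ definition above) =====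
theorem compute_endLen_spec : Claim_equal_compute_endLen := by
  intro s d1 _hd _hp
  unfold Spec_compute_endLen compute_endLen
  rw [alt_eq_map_bval]
  have h := loop_eq d1 s.toList.length s.toList.length 0 [] 0 (by omega) (by omega) rfl
    (by intro c hc; omega)
  simp only [List.range_eq_range'] at h ⊢
  simpa using h
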